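-- pv_equiv track=rewrite | github.com/soohyunr/annotation-tool | analysis/reason_word_cloud.py | clean_reason
-- ===== SOURCE A (Python) =====
-- def clean_reason(reason):
--     reason = reason.lower()
--     reason = reason.replace("'d", ' had')
--     reason = reason.replace("n't", ' not')
--
--     for punct in "/-'":
--         reason = reason.replace(punct, ' ')
--     for punct in '&':
--         reason = reason.replace(punct, ' {} '.format(punct))
--     for punct in '?!.,"#$%\'()*+-/:;<=>@[\\]^_`{|}~' + '“”’':
--         reason = reason.replace(punct, '')
--     return reason
-- ===== SOURCE B (Python) =====
-- SPACES = set("/-'")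
-- DELETE = set('?!.,"#$%\'()*+-/:;<=>@[\\]^_`{|}~' + '“”’')
--
-- def _clean_char(c):
--     if c in SPACES:
--         return ' '
--     if c == '&':
--         return ' & '
--     if c in DELETE:
--         return ''
--     return c
--
-- def clean_reason(reason):
--     reason = reason.lower()
--     reason = reason.replace("'d", ' had')
--     reason = reason.replace("n't", ' not')
--     return ''.join(_clean_char(c) for c in reason)
-- ===== Notes on version B (the rewrite author's own statement) =====
-- stated objective: idiomatic
-- what changed: Keeps lower() and the two multi-char contraction replaces, then fuses the three sequential per-character replace loops (space-set, '&', deletion-set) into a single traversal that maps each character to its replacement and joins the pieces.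
import Mathlib
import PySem

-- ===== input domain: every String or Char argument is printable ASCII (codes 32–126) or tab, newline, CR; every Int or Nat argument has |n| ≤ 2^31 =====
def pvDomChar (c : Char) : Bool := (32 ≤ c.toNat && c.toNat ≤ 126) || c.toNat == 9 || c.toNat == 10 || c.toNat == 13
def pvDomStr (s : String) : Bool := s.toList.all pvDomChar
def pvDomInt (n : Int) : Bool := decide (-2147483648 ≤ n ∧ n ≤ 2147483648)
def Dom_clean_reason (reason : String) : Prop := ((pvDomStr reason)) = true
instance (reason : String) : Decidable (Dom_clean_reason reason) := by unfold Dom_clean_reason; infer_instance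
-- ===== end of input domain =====

-- B fuses A's three per-character replace loops into one traversal (idiomatic, same cost class).

-- ===== PORT A =====
def clean_reason (reason : String) : String :=
  let r1 := PySem.Str.lower reason
  let r2 := PySem.Str.replace r1 "'d" " had"
  let r3 := PySem.Str.replace r2 "n't" " not"
  let r4 := List.foldl (fun r punct => PySem.Str.replace r (String.singleton punct) " ") r3 "/-'".toList
  let r5 := List.foldl (fun r punct =>
      PySem.Str.replace r (String.singleton punct) (" " ++ String.singleton punct ++ " ")) r4 "&".toList
  let r6 := List.foldl (fun r punct => PySem.Str.replace r (String.singleton punct) "") r5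
      ("?!.,\"#$%'()*+-/:;<=>@[\\]^_`{|}~" ++ "“”’").toList
  r6

-- ===== PORT B =====
def cleanChar (c : Char) : List Char :=
  if c ∈ "/-'".toList then [' ']
  else if c = '&' then [' ', '&', ' ']
  else if c ∈ ("?!.,\"#$%'()*+-/:;<=>@[\\]^_`{|}~" ++ "“”’").toList then []
  else [c]

def clean_reason_alt (reason : String) : String :=
  let r1 := PySem.Str.lower reason
  let r2 := PySem.Str.replace r1 "'d" " had"
  let r3 := PySem.Str.replace r2 "n't" " not"
  String.ofList (r3.toList.flatMap cleanChar)

-- ===== PRECONDITION & SPEC =====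
def Spec_clean_reason (reason : String) (out : String) : Prop := out = clean_reason_alt reason
instance (reason : String) (out : String) : Decidable (Spec_clean_reason reason out) := by unfold Spec_clean_reason; infer_instance

-- ===== CLAIM (what is proved, stated in full; the proofs are below) =====
def Claim_equal_clean_reason : Prop := ∀ (reason : String), Dom_clean_reason reason → Spec_clean_reason reason (clean_reason reason)

-- ===== LEMMAS AND PROOFS =====

lemma go_single (p : Char) (ns : List Char) :
    ∀ (l : List Char) (fuel : Nat) (acc : List Char), l.length ≤ fuel →
      PySem.Chars.replace.go [p] ns fuel l acc =
        acc.reverse ++ l.flatMap (fun c => if c = p then ns else [c]) := by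
  intro l
  induction l with
  | nil =>
    intro fuel acc _
    cases fuel <;> simp [PySem.Chars.replace.go]
  | cons c t ih =>
    intro fuel acc h
    cases fuel with
    | zero => simp at h
    | succ f =>
      simp only [PySem.Chars.replace.go]
      by_cases hc : c = p
      · subst hc
        simp [List.isPrefixOf, ih f _ (by simpa using h)]
      · have hpre : ([p].isPrefixOf (c :: t)) = false := by
          simp [List.isPrefixOf]
          exact fun h' => absurd h'.symm hc
        simp [hpre, ih f _ (by simpa using h), hc]

lemma replace_single (l : List Char) (p : Char) (ns : List Char) :
    PySem.Chars.replace l [p] ns = l.flatMap (fun c => if c = p then ns else [c]) := by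
  rw [PySem.Chars.replace]
  simp [go_single p ns l l.length [] le_rfl]

lemma str_replace_single (s : String) (p : Char) (ns : String) :
    PySem.Str.replace s (String.singleton p) ns =
      String.ofList (s.toList.flatMap (fun c => if c = p then ns.toList else [c])) := by
  rw [PySem.Str.replace]
  simp [replace_single]

set_option maxHeartbeats 1000000 in
theorem clean_reason_spec : Claim_equal_clean_reason := by
  intro reason _
  show clean_reason reason = clean_reason_alt reason
  unfold clean_reason clean_reason_alt
  simp only [show ("/-'".toList)=['/','-','\''] from by decide, show ("&".toList)=['&'] from by decide,
    show (("?!.,\"#$%'()*+-/:;<=>@[\\]^_`{|}~" ++ "“”’").toList) =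
      ['?','!','.',',','"','#','$','%','\'','(',')','*','+','-','/',':',';','<','=','>','@','[','\\',']','^','_','`','{','|','}','~','“','”','’'] from by decide,
    List.foldl_cons, List.foldl_nil]
  simp only [str_replace_single]
  simp only [String.toList_ofList]
  refine congrArg String.ofList ?_
  simp only [List.flatMap_assoc]
  apply List.flatMap_congr
  intro c _
  by_cases h : c ∈ ['/', '-', '\'', '&', '?','!','.',',','"','#','$','%','(',')','*','+',':',';','<','=','>','@','[','\\',']','^','_','`','{','|','}','~','“','”','’']
  · fin_cases h <;> decide
  · simp only [List.mem_cons, List.not_mem_nil, or_false, not_or] at h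
    simp [cleanChar, h]
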